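-- pv_equiv track=rewrite | github.com/emptycastlepark/TIL | Algorithm/PROGRAMMERS/예산.py | solution
-- ===== SOURCE A (Python) =====
-- def solution(budgets, M):
--     answer = 0
--     minb, maxb = 0, max(budgets)
--     while maxb >= minb:
--         mid = (minb + maxb) // 2
--         temp = [None] * len(budgets)
--         for i in range(len(budgets)):
--             if budgets[i] > mid:
--                 temp[i] = mid
--             else:
--                 temp[i] = budgets[i]
--         if sum(temp) > M:
--             maxb = mid - 1
--         else:
--             answer, minb = mid, mid + 1
--     return answer
-- ===== SOURCE B (Python) =====
-- def solution(budgets, M):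
--     s = sorted(budgets)
--     rem = M
--     k = len(s)
--     last = s[-1]
--     for x in s:
--         if x * k <= rem:
--             rem -= x
--             k -= 1
--         else:
--             return max(0, rem // k)
--     return max(0, last)
-- ===== Notes on version B (the rewrite author's own statement) =====
-- stated objective: faster
-- what changed: Replaced the binary search over cap values (recomputing the full capped sum for every probe) by sort + one greedy pass over prefix sums that computes the optimal cap directly with one floor division.
import Mathlib
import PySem

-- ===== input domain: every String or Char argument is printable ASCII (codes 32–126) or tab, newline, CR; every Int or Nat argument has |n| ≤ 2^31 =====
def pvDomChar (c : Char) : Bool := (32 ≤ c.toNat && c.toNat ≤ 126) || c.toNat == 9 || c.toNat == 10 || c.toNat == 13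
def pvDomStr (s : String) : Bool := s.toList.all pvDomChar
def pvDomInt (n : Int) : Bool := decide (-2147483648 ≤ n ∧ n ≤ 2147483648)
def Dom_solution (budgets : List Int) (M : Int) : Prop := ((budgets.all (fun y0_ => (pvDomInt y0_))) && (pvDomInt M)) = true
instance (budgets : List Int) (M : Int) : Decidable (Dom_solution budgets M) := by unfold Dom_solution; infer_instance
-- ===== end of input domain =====

-- B replaces A's binary search over cap values (each probe re-summing the capped list) by
-- sort + one greedy pass that computes the optimal cap with a single floor division.

-- ===== PORT A =====
-- the while-loop of A: state (answer, minb, maxb)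
def pvLoopA (budgets : List Int) (M : Int) (answer minb maxb : Int) : Int :=
  if h : maxb ≥ minb then
    let mid := PySem.Int.floordiv (minb + maxb) 2
    let temp := budgets.map (fun b => if b > mid then mid else b)
    if temp.sum > M then pvLoopA budgets M answer minb (mid - 1)
    else pvLoopA budgets M mid (mid + 1) maxb
  else answer
termination_by (maxb - minb + 1).toNat
decreasing_by
  · have hb := PySem.Int.floordiv_two_mid_bounds h
    omega
  · have hb := PySem.Int.floordiv_two_mid_bounds h
    omega

def solution (budgets : List Int) (M : Int) : Int :=
  match PySem.List.max? budgets (fun y => y) with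
  | none => 0          -- max([]) raises ValueError in Python: outside Pre_
  | some maxb => pvLoopA budgets M 0 0 maxb

-- ===== PORT B =====
-- the for-loop of Source B over the sorted list: remaining suffix, rem, and s[-1]
def pvGoB : List Int → Int → Int → Int
  | [], _rem, last => max 0 last
  | x :: t, rem, last =>
      if x * ((x :: t).length : Int) ≤ rem then pvGoB t (rem - x) last
      else max 0 (PySem.Int.floordiv rem ((x :: t).length : Int))

def solution_alt (budgets : List Int) (M : Int) : Int :=
  let s := PySem.List.sorted budgets (fun y => y)
  match PySem.List.pyGet? s (-1) with
  | none => 0          -- s[-1] raises IndexError in Python: outside Pre_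
  | some last => pvGoB s M last

-- ===== PRECONDITION & SPEC =====
-- Pre_ excludes exactly the empty list, on which A raises ValueError (max of empty sequence).
def Pre_solution (budgets : List Int) (M : Int) : Prop := budgets ≠ []
instance (budgets : List Int) (M : Int) : Decidable (Pre_solution budgets M) := by
  unfold Pre_solution; infer_instance
def pvWitness_solution : List Int × Int := ([1, 2, 3], 5)

def Spec_solution (budgets : List Int) (M : Int) (out : Int) : Prop := out = solution_alt budgets M
instance (budgets : List Int) (M : Int) (out : Int) : Decidable (Spec_solution budgets M out) := by
  unfold Spec_solution; infer_instance

-- ===== CLAIM (what is proved, stated in full; the proofs are below) =====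
def Claim_equal_solution : Prop := ∀ (budgets : List Int) (M : Int), Dom_solution budgets M → Pre_solution budgets M → Spec_solution budgets M (solution budgets M)

-- ===== LEMMAS AND PROOFS =====

-- f(c) = sum of min(b, c): the capped total A computes for a probe c (definitionally A's temp sum)
def pvF (bs : List Int) (c : Int) : Int := (bs.map (fun b => if b > c then c else b)).sum

lemma pvF_mono (bs : List Int) (c c' : Int) (h : c ≤ c') : pvF bs c ≤ pvF bs c' := by
  induction bs with
  | nil => simp [pvF]
  | cons b t ih =>
    simp only [pvF, List.map_cons, List.sum_cons] at *
    split_ifs <;> omega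

lemma pvF_perm (bs bs' : List Int) (h : bs.Perm bs') (c : Int) : pvF bs c = pvF bs' c :=
  (h.map _).sum_eq

lemma pvF_append (p t : List Int) (c : Int) : pvF (p ++ t) c = pvF p c + pvF t c := by
  simp [pvF]

lemma pvF_all_le (p : List Int) (c : Int) (h : ∀ b ∈ p, b ≤ c) : pvF p c = p.sum := by
  induction p with
  | nil => rfl
  | cons b t ih =>
    have hb := h b (by simp)
    simp only [pvF, List.map_cons, List.sum_cons] at *
    rw [if_neg (by omega), ih (fun y hy => h y (by simp [hy]))]

lemma pvF_all_ge (t : List Int) (c : Int) (h : ∀ b ∈ t, c ≤ b) : pvF t c = c * t.length := by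
  induction t with
  | nil => simp [pvF]
  | cons b t ih =>
    have hb := h b (by simp)
    simp only [pvF, List.map_cons, List.sum_cons, List.length_cons] at *
    rw [ih (fun y hy => h y (by simp [hy]))]
    push_cast
    split_ifs <;> [skip; skip] <;> ring_nf <;> omega

-- the characterisation both ports satisfy: r is A's answer iff …
def pvGood (budgets : List Int) (M maxb0 r : Int) : Prop :=
  0 ≤ r ∧ r ≤ max maxb0 0 ∧ (0 < r → pvF budgets r ≤ M) ∧ (r < maxb0 → ¬ pvF budgets (r + 1) ≤ M)

lemma pvGood_not_lt (budgets : List Int) (M maxb0 r1 r2 : Int)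
    (h1 : pvGood budgets M maxb0 r1) (h2 : pvGood budgets M maxb0 r2) : ¬ r1 < r2 := by
  obtain ⟨a1, b1, c1, d1⟩ := h1
  obtain ⟨a2, b2, c2, d2⟩ := h2
  intro hlt
  have hp2 : pvF budgets r2 ≤ M := c2 (by omega)
  by_cases h : r1 < maxb0
  · exact d1 h (le_trans (pvF_mono budgets (r1 + 1) r2 (by omega)) hp2)
  · omega

lemma pvGood_uniq (budgets : List Int) (M maxb0 r1 r2 : Int)
    (h1 : pvGood budgets M maxb0 r1) (h2 : pvGood budgets M maxb0 r2) : r1 = r2 := by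
  have ha := pvGood_not_lt budgets M maxb0 r1 r2 h1 h2
  have hb := pvGood_not_lt budgets M maxb0 r2 r1 h2 h1
  omega

-- ---- A side: the binary search satisfies pvGood ----

lemma pvLoopA_exit (budgets : List Int) (M maxb0 answer minb maxb : Int)
    (hlt : maxb < minb)
    (ha : (answer = 0 ∧ minb = 0) ∨ (0 ≤ answer ∧ answer = minb - 1 ∧ pvF budgets answer ≤ M))
    (hub : answer ≤ max maxb0 0)
    (h5 : ∀ c, maxb < c → c ≤ maxb0 → ¬ pvF budgets c ≤ M) :
    pvGood budgets M maxb0 answer := by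
  refine ⟨by omega, hub, ?_, ?_⟩
  · intro hpos
    rcases ha with ⟨h0, _⟩ | ⟨_, _, hP⟩
    · omega
    · exact hP
  · intro hlt0
    refine h5 (answer + 1) ?_ (by omega)
    rcases ha with ⟨h0, hm⟩ | ⟨_, hm, _⟩ <;> omega

lemma pvLoopA_inv (budgets : List Int) (M maxb0 : Int) :
    ∀ (n : Nat) (answer minb maxb : Int), (maxb - minb + 1).toNat ≤ n →
      0 ≤ minb →
      ((answer = 0 ∧ minb = 0) ∨ (0 ≤ answer ∧ answer = minb - 1 ∧ pvF budgets answer ≤ M)) →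
      answer ≤ max maxb0 0 →
      maxb ≤ maxb0 →
      (∀ c, maxb < c → c ≤ maxb0 → ¬ pvF budgets c ≤ M) →
      pvGood budgets M maxb0 (pvLoopA budgets M answer minb maxb) := by
  intro n
  induction n with
  | zero =>
    intro answer minb maxb hn hm ha hub hmx h5
    rw [pvLoopA, dif_neg (by omega)]
    exact pvLoopA_exit budgets M maxb0 answer minb maxb (by omega) ha hub h5
  | succ n ih =>
    intro answer minb maxb hn hm ha hub hmx h5
    by_cases hg : maxb ≥ minb
    · rw [pvLoopA, dif_pos hg]
      obtain ⟨hlo, hhi⟩ := PySem.Int.floordiv_two_mid_bounds hg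
      set mid := PySem.Int.floordiv (minb + maxb) 2 with hmid
      simp only []
      by_cases hP : (budgets.map (fun b => if b > mid then mid else b)).sum > M
      · rw [if_pos hP]
        have hPmid : ¬ pvF budgets mid ≤ M := by
          simp only [pvF]; omega
        refine ih answer minb (mid - 1) (by omega) hm ha hub (by omega) ?_
        intro c hc hc0 hPc
        exact hPmid (le_trans (pvF_mono budgets mid c (by omega)) hPc)
      · rw [if_neg hP]
        have hPmid : pvF budgets mid ≤ M := by
          simp only [pvF]; omega
        refine ih mid (mid + 1) maxb (by omega) (by omega)
          (Or.inr ⟨by omega, by omega, hPmid⟩) (by omega) hmx h5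
    · rw [pvLoopA, dif_neg hg]
      exact pvLoopA_exit budgets M maxb0 answer minb maxb (by omega) ha hub h5

lemma solution_good (budgets : List Int) (M maxb0 : Int)
    (hmax : PySem.List.max? budgets (fun y => y) = some maxb0) :
    pvGood budgets M maxb0 (solution budgets M) := by
  unfold solution
  rw [hmax]
  exact pvLoopA_inv budgets M maxb0 (maxb0 + 1).toNat 0 0 maxb0 (by omega) le_rfl
    (Or.inl ⟨rfl, rfl⟩) (by omega) le_rfl (fun c h1 h2 _ => by omega)

-- ---- B side: the greedy pass satisfies pvGood ----

lemma pvGoB_inv (budgets : List Int) (M maxb0 : Int)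
    (hne : budgets ≠ [])
    (hmax : ∀ y ∈ budgets, y ≤ maxb0) :
    ∀ (t p : List Int) (rem : Int),
      PySem.List.sorted budgets (fun y => y) = p ++ t →
      (p ++ t).Pairwise (· ≤ ·) →
      rem = M - p.sum →
      (∀ y ∈ p, y * (t.length : Int) ≤ rem) →
      pvGood budgets M maxb0 (pvGoB t rem maxb0) := by
  intro t
  induction t with
  | nil =>
    intro p rem hsplit hpw hrem hG2
    have hperm : budgets.Perm p := by
      have := PySem.List.sorted_perm budgets (fun y => y) false
      rw [hsplit] at this
      simpa using this.symm
    have hpne : p ≠ [] := by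
      intro h; exact hne (List.Perm.eq_nil (h ▸ hperm))
    obtain ⟨y, hy⟩ := List.exists_mem_of_ne_nil p hpne
    have hrem0 : 0 ≤ rem := by have := hG2 y hy; simpa using this
    have hr : pvGoB [] rem maxb0 = max 0 maxb0 := rfl
    rw [hr]
    refine ⟨by omega, by omega, ?_, by omega⟩
    intro hpos
    have hle : ∀ b ∈ budgets, b ≤ max 0 maxb0 := fun b hb => le_trans (hmax b hb) (by omega)
    rw [pvF_all_le budgets _ hle]
    have : budgets.sum = p.sum := hperm.sum_eq
    omega
  | cons x t' ih =>
    intro p rem hsplit hpw hrem hG2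
    have hperm : (PySem.List.sorted budgets (fun y => y)).Perm budgets :=
      PySem.List.sorted_perm budgets (fun y => y) false
    have hpermPT : budgets.Perm (p ++ x :: t') := by rw [← hsplit]; exact hperm.symm
    have hk : ((x :: t').length : Int) = (t'.length : Int) + 1 := by simp
    have hpw' := List.pairwise_append.mp hpw
    have hxle : ∀ z ∈ x :: t', x ≤ z := by
      intro z hz
      rcases List.mem_cons.mp hz with h | h
      · omega
      · exact List.rel_of_pairwise_cons hpw'.2.1 h
    have hple : ∀ y ∈ p, y ≤ x := fun y hy => hpw'.2.2 y hy x (by simp)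
    show pvGood budgets M maxb0 (pvGoB (x :: t') rem maxb0)
    rw [pvGoB]
    by_cases hc : x * ((x :: t').length : Int) ≤ rem
    · rw [if_pos hc]
      refine ih (p ++ [x]) (rem - x) ?_ ?_ ?_ ?_
      · rw [hsplit, List.append_cons]
      · rw [← List.append_cons]; exact hpw
      · simp [List.sum_append]; omega
      · intro y hy
        rcases List.mem_append.mp hy with h | h
        · have h1 := hG2 y h
          rw [hk] at h1 hc
          have h2 : y * (t'.length : Int) ≤ x * (t'.length : Int) :=
            mul_le_mul_of_nonneg_right (hple y h) (by positivity)
          nlinarith [hc, h2]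
        · have hyx : y = x := by simpa using h
          subst hyx
          rw [hk] at hc
          nlinarith [hc]
    · rw [if_neg hc]
      have hkpos : (0 : Int) < ((x :: t').length : Int) := by rw [hk]; positivity
      set k : Int := ((x :: t').length : Int) with hkdef
      set c0 : Int := PySem.Int.floordiv rem k with hc0
      have hc0x : c0 < x := (PySem.Int.floordiv_lt_iff_lt_mul hkpos).mpr (by omega)
      have hc0k : c0 * k ≤ rem := (PySem.Int.le_floordiv_iff_mul_le hkpos).mp le_rfl
      have hrem1 : rem < (c0 + 1) * k := (PySem.Int.floordiv_lt_iff_lt_mul hkpos).mp (by omega)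
      have hpc0 : ∀ y ∈ p, y ≤ c0 := fun y hy =>
        (PySem.Int.le_floordiv_iff_mul_le hkpos).mpr (hG2 y hy)
      have hxmem : x ∈ budgets := hpermPT.mem_iff.mpr (by simp)
      have hxmax : x ≤ maxb0 := hmax x hxmem
      have hF : ∀ c : Int, (∀ y ∈ p, y ≤ c) → (∀ z ∈ x :: t', c ≤ z) →
          pvF budgets c = p.sum + c * k := by
        intro c h1 h2
        rw [pvF_perm budgets (p ++ x :: t') hpermPT c, pvF_append,
          pvF_all_le p c h1, pvF_all_ge (x :: t') c h2]
      have hPc0 : pvF budgets c0 ≤ M := by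
        rw [hF c0 hpc0 (fun z hz => le_trans (by omega) (hxle z hz))]
        omega
      have hNPc1 : ¬ pvF budgets (c0 + 1) ≤ M := by
        rw [hF (c0 + 1) (fun y hy => by have := hpc0 y hy; omega)
          (fun z hz => le_trans (by omega) (hxle z hz))]
        omega
      refine ⟨by omega, by omega, ?_, ?_⟩
      · intro hpos
        have : max 0 c0 = c0 := by omega
        rw [this]
        exact hPc0
      · intro _ hP
        exact hNPc1 (le_trans (pvF_mono budgets (c0 + 1) (max 0 c0 + 1) (by omega)) hP)

lemma pairwise_le_getLast? (s : List Int) (l : Int)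
    (hpw : s.Pairwise (· ≤ ·)) (hl : s.getLast? = some l) : ∀ y ∈ s, y ≤ l := by
  induction s with
  | nil => simp at hl
  | cons x t ih =>
    intro y hy
    cases t with
    | nil =>
      simp at hl hy
      omega
    | cons a t' =>
      have hpw' := List.pairwise_cons.mp hpw
      have hl' : (a :: t').getLast? = some l := by
        rw [List.getLast?_cons_cons] at hl; exact hl
      rcases List.mem_cons.mp hy with h | h
      · subst h
        have ha : l ∈ a :: t' := by
          have := List.mem_of_getLast? hl'
          exact this
        exact hpw'.1 l ha
      · exact ih hpw'.2 hl' y h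

lemma solution_alt_good (budgets : List Int) (M maxb0 : Int)
    (hne : budgets ≠ [])
    (hmaxs : PySem.List.max? budgets (fun y => y) = some maxb0) :
    pvGood budgets M maxb0 (solution_alt budgets M) := by
  have hperm : (PySem.List.sorted budgets (fun y => y)).Perm budgets :=
    PySem.List.sorted_perm budgets (fun y => y) false
  have hsne : PySem.List.sorted budgets (fun y => y) ≠ [] := by
    intro h
    exact hne (List.Perm.eq_nil (h ▸ hperm.symm))
  have hpw : (PySem.List.sorted budgets (fun y => y)).Pairwise (· ≤ ·) := by
    have := PySem.List.sorted_pairwise budgets (fun y => y)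
    simpa using this
  have hmax : ∀ y ∈ budgets, y ≤ maxb0 := fun y hy => PySem.List.max?_isMax hmaxs y hy
  obtain ⟨last, hlast⟩ : ∃ l, (PySem.List.sorted budgets (fun y => y)).getLast? = some l := by
    cases h : (PySem.List.sorted budgets (fun y => y)).getLast? with
    | none => exact absurd (List.getLast?_eq_none_iff.mp h) hsne
    | some l => exact ⟨l, rfl⟩
  have hlm : last = maxb0 := by
    have h1 : last ∈ budgets :=
      hperm.mem_iff.mp (List.mem_of_getLast? hlast)
    have h2 : maxb0 ∈ PySem.List.sorted budgets (fun y => y) :=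
      hperm.mem_iff.mpr (PySem.List.max?_mem hmaxs)
    have h3 := pairwise_le_getLast? _ last hpw hlast maxb0 h2
    have h4 := hmax last h1
    omega
  unfold solution_alt
  simp only [PySem.List.pyGet?_neg_one, hlast, hlm]
  exact pvGoB_inv budgets M maxb0 hne hmax (PySem.List.sorted budgets (fun y => y)) [] M
    rfl (by simpa using hpw) (by simp) (by simp)

-- ===== VERDICT (by name: the statement is the Claim_ definition above) =====
theorem solution_spec : Claim_equal_solution := by
  intro budgets M _hdom hpre
  unfold Spec_solution
  cases hmax : PySem.List.max? budgets (fun y => y) with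
  | none => exact absurd ((PySem.List.max?_eq_none_iff budgets (fun y => y)).mp hmax) hpre
  | some maxb0 =>
    exact pvGood_uniq budgets M maxb0 _ _
      (solution_good budgets M maxb0 hmax)
      (solution_alt_good budgets M maxb0 hpre hmax)
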